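-- pv_equiv track=rewrite | github.com/Vans0110/LEXO | engine/segmenter.py | _split_dialogue_aware_sentences
-- ===== SOURCE A (Python) =====
-- def _split_dialogue_aware_sentences(text: str) -> list[str]:
--     if not text:
--         return []
--     parts: list[str] = []
--     current: list[str] = []
--     in_quote = False
--     index = 0
--     while index < len(text):
--         char = text[index]
--         current.append(char)
--         if char == '"':
--             in_quote = not in_quote
--         if char in ".!?" and not in_quote:
--             lookahead = text[index + 1 :]
--             if not lookahead.strip():
--                 parts.append("".join(current).strip())
--                 current = []
--             else:
--                 next_non_space = next((item for item in lookahead if not item.isspace()), "")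
--                 if next_non_space in {'"', "(", "["} or next_non_space.isupper():
--                     parts.append("".join(current).strip())
--                     current = []
--                     while index + 1 < len(text) and text[index + 1].isspace():
--                         index += 1
--         index += 1
--     if current:
--         parts.append("".join(current).strip())
--     return [part for part in parts if part]
-- ===== SOURCE B (Python) =====
-- def _split_dialogue_aware_sentences(text: str) -> list[str]:
--     # One forward pass with index arithmetic: sentences are slices text[start:i+1];
--     # the lookahead is found by scanning from i+1 instead of slicing/stripping the rest.
--     parts: list[str] = []
--     n = len(text)
--     in_quote = False
--     start = 0
--     i = 0
--     while i < n:
--         ch = text[i]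
--         if ch == '"':
--             in_quote = not in_quote
--         if ch in '.!?' and not in_quote:
--             j = i + 1
--             while j < n and text[j].isspace():
--                 j += 1
--             if j == n:
--                 seg = text[start:i + 1].strip()
--                 if seg:
--                     parts.append(seg)
--                 start = i + 1
--                 i += 1
--             elif text[j] in '"([' or text[j].isupper():
--                 seg = text[start:i + 1].strip()
--                 if seg:
--                     parts.append(seg)
--                 start = j
--                 i = j
--             else:
--                 i += 1
--         else:
--             i += 1
--     if start < n:
--         seg = text[start:].strip()
--         if seg:
--             parts.append(seg)
--     return parts
-- ===== Notes on version B (the rewrite author's own statement) =====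
-- stated objective: faster
-- what changed: Replaced A's per-punctuation slicing of the whole tail (text[index+1:], .strip(), generator scan) and per-char list accumulation with a single forward pass that finds the next non-space index by direct scanning and emits sentences as slices text[start:i+1].
import Mathlib
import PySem

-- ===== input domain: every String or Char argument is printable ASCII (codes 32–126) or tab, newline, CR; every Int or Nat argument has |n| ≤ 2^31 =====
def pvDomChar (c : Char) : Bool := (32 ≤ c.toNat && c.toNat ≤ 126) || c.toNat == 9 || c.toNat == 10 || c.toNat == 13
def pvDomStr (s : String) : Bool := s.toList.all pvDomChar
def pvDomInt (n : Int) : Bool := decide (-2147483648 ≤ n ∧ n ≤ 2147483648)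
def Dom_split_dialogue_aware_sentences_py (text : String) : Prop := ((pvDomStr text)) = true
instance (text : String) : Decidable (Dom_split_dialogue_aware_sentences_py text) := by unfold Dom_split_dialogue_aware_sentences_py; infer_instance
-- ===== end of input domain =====

-- B replaces A's per-punctuation slicing/stripping of the whole tail (O(n^2)) by a single
-- forward scan with index arithmetic: sentences are slices text[start:i+1] and the lookahead
-- is the next non-space index found by scanning from i+1.  Same return value everywhere.

-- ===== PORT A =====

-- A's inner skip loop: while index + 1 < len(text) and text[index + 1].isspace(): index += 1
def pvSkipA (cs : List Char) (index : Nat) : Nat :=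
  if h : index + 1 < cs.length then
    if PySem.Chars.isspace cs[index + 1] then pvSkipA cs (index + 1) else index
  else index
termination_by cs.length - index

-- termination helper for pvALoop (cited in its decreasing_by)
lemma pvSkipA_le (cs : List Char) (index : Nat) : index ≤ pvSkipA cs index := by
  fun_induction pvSkipA cs index with
  | case1 i h hs ih => omega
  | case2 i h hs => omega
  | case3 i h => omega

-- A's main while loop; `current` is the accumulated list of chars
def pvALoop (cs : List Char) (index : Nat) (parts : List String) (current : List Char)
    (inQuote : Bool) : List String :=
  if h : index < cs.length then
    let char := cs[index]
    let current' := current ++ [char]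
    let inQuote' := if char == '"' then !inQuote else inQuote
    if (char == '.' || char == '!' || char == '?') && !inQuote' then
      let lookahead := cs.drop (index + 1)          -- text[index + 1 :]
      if (PySem.Chars.strip lookahead).isEmpty then -- not lookahead.strip()
        pvALoop cs (index + 1) (parts ++ [String.ofList (PySem.Chars.strip current')]) [] inQuote'
      else
        -- next_non_space = next((item for item in lookahead if not item.isspace()), "")
        match lookahead.find? (fun c => !PySem.Chars.isspace c) with
        | some c =>
          if c == '"' || c == '(' || c == '[' || PySem.Chars.isupper c then
            pvALoop cs (pvSkipA cs index + 1)
              (parts ++ [String.ofList (PySem.Chars.strip current')]) [] inQuote'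
          else pvALoop cs (index + 1) parts current' inQuote'
        | none => -- next_non_space = "" : not in the set and "".isupper() is False
          pvALoop cs (index + 1) parts current' inQuote'
    else pvALoop cs (index + 1) parts current' inQuote'
  else
    -- if current: parts.append("".join(current).strip())
    if current.isEmpty then parts else parts ++ [String.ofList (PySem.Chars.strip current)]
termination_by cs.length - index
decreasing_by
  · omega
  · have := pvSkipA_le cs index; omega
  · omega
  · omega

def split_dialogue_aware_sentences_py (text : String) : List String :=
  if text.toList.isEmpty then []                    -- if not text: return []
  else (pvALoop text.toList 0 [] [] false).filter (fun part => !(part == ""))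

-- ===== PORT B =====

-- B's inner scan: j = i + 1; while j < n and text[j].isspace(): j += 1
def pvNextNS (cs : List Char) (j : Nat) : Nat :=
  if h : j < cs.length then
    if PySem.Chars.isspace cs[j] then pvNextNS cs (j + 1) else j
  else j
termination_by cs.length - j

-- termination helper for pvBLoop (cited in its decreasing_by)
lemma pvNextNS_le (cs : List Char) (j : Nat) : j ≤ pvNextNS cs j := by
  fun_induction pvNextNS cs j with
  | case1 i h hs ih => omega
  | case2 i h hs => omega
  | case3 i h => omega

-- B's main while loop; sentences are slices text[start : i + 1]
def pvBLoop (cs : List Char) (i start : Nat) (inQuote : Bool) (parts : List String) :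
    List String :=
  if h : i < cs.length then
    let ch := cs[i]
    let inQuote' := if ch == '"' then !inQuote else inQuote
    if (ch == '.' || ch == '!' || ch == '?') && !inQuote' then
      let j := pvNextNS cs (i + 1)
      if hj : j < cs.length then
        if cs[j] == '"' || cs[j] == '(' || cs[j] == '[' || PySem.Chars.isupper cs[j] then
          let seg := String.ofList (PySem.Chars.strip
            (PySem.List.slice cs (some (start : Int)) (some ((i + 1 : Nat) : Int))))
          pvBLoop cs j j inQuote' (if seg == "" then parts else parts ++ [seg])
        else pvBLoop cs (i + 1) start inQuote' parts
      else
        let seg := String.ofList (PySem.Chars.strip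
          (PySem.List.slice cs (some (start : Int)) (some ((i + 1 : Nat) : Int))))
        pvBLoop cs (i + 1) (i + 1) inQuote' (if seg == "" then parts else parts ++ [seg])
    else pvBLoop cs (i + 1) start inQuote' parts
  else
    if start < cs.length then
      let seg := String.ofList (PySem.Chars.strip (PySem.List.slice cs (some (start : Int)) none))
      if seg == "" then parts else parts ++ [seg]
    else parts
termination_by cs.length - i
decreasing_by
  · have := pvNextNS_le cs (i + 1); omega
  · omega
  · omega
  · omega

def split_dialogue_aware_sentences_py_alt (text : String) : List String :=
  pvBLoop text.toList 0 0 false []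

-- ===== PRECONDITION & SPEC =====
def Spec_split_dialogue_aware_sentences_py (text : String) (out : List String) : Prop := out = split_dialogue_aware_sentences_py_alt text
instance (text : String) (out : List String) : Decidable (Spec_split_dialogue_aware_sentences_py text out) := by unfold Spec_split_dialogue_aware_sentences_py; infer_instance

-- ===== CLAIM (what is proved, stated in full; the proofs are below) =====
def Claim_equal_split_dialogue_aware_sentences_py : Prop := ∀ (text : String), Dom_split_dialogue_aware_sentences_py text → Spec_split_dialogue_aware_sentences_py text (split_dialogue_aware_sentences_py text)

-- ===== LEMMAS AND PROOFS =====

lemma pv_strip_eq_nil_iff (l : List Char) :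
    PySem.Chars.strip l = [] ↔ ∀ c ∈ l, PySem.Chars.isspace c = true := by
  have h1 : PySem.Chars.strip l =
      ((((l.dropWhile PySem.Chars.isspace).reverse.dropWhile PySem.Chars.isspace)).reverse) := rfl
  rw [h1]
  simp only [List.reverse_eq_nil_iff, List.dropWhile_eq_nil_iff, List.mem_reverse]
  constructor
  · intro h
    have hnil : l.dropWhile PySem.Chars.isspace = [] := by
      rcases hd : l.dropWhile PySem.Chars.isspace with _ | ⟨c, t⟩
      · rfl
      · exfalso
        have hhead := List.head_dropWhile_not PySem.Chars.isspace (l := l) (by simp [hd])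
        have hc : (l.dropWhile PySem.Chars.isspace).head (by simp [hd]) = c := by
          simp [hd]
        rw [hc] at hhead
        have := h c (by simp [hd])
        rw [this] at hhead
        simp at hhead
    rw [List.dropWhile_eq_nil_iff] at hnil
    exact fun c hc => hnil c hc
  · intro h c hc
    exact h c ((List.dropWhile_sublist _).subset hc)

-- A's find? over the tail is exactly the char at B's scan result
lemma pv_find?_drop (cs : List Char) (j : Nat) :
    (cs.drop j).find? (fun c => !PySem.Chars.isspace c) = cs[pvNextNS cs j]? := by
  fun_induction pvNextNS cs j with
  | case1 j h hs ih =>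
    rw [List.drop_eq_getElem_cons h, List.find?_cons_of_neg (by simp [hs])]
    exact ih
  | case2 j h hs =>
    rw [List.drop_eq_getElem_cons h, List.find?_cons_of_pos (by simp [hs])]
    simp [List.getElem?_eq_getElem h]
  | case3 j h =>
    have hnj : cs.length ≤ j := by omega
    rw [List.drop_eq_nil_of_le hnj]
    simp [List.getElem?_eq_none hnj]

lemma pv_skipA_succ (cs : List Char) (i : Nat) :
    pvSkipA cs i + 1 = pvNextNS cs (i + 1) := by
  fun_induction pvSkipA cs i with
  | case1 i h hs ih =>
    rw [ih]
    conv_rhs => rw [pvNextNS]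
    simp [h, hs]
  | case2 i h hs =>
    rw [pvNextNS]
    simp [h, hs]
  | case3 i h =>
    rw [pvNextNS]
    simp [show ¬ (i + 1 < cs.length) from h]

lemma pv_loop_eq (cs : List Char) (k : Nat) :
    ∀ (i start : Nat) (parts : List String) (inq : Bool),
      cs.length - i ≤ k → start ≤ i →
      (pvALoop cs i parts ((cs.drop start).take (i - start)) inq).filter (fun p => !(p == ""))
        = pvBLoop cs i start inq (parts.filter (fun p => !(p == ""))) := by
  induction k with
  | zero =>
    intro i start parts inq hk hsi
    have hni : ¬ i < cs.length := by omega
    rw [pvALoop, pvBLoop]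
    simp only [dif_neg hni]
    have hcur : (cs.drop start).take (i - start) = cs.drop start :=
      List.take_of_length_le (by simp; omega)
    rw [hcur, PySem.List.slice_from_natCast]
    by_cases hs : start < cs.length
    · have hne : ¬ (cs.drop start).isEmpty := by
        simp [List.isEmpty_iff, List.drop_eq_nil_iff]; omega
      simp only [hne, hs, if_true, Bool.false_eq_true, if_false, List.filter_append]
      by_cases hz : String.ofList (PySem.Chars.strip (cs.drop start)) = ""
      · simp [hz]
      · simp [hz]
    · have he : (cs.drop start).isEmpty := by
        simp [List.isEmpty_iff, List.drop_eq_nil_iff]; omega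
      simp [he, hs]
  | succ k ih =>
    intro i start parts inq hk hsi
    by_cases h : i < cs.length
    · rw [pvALoop, pvBLoop]
      simp only [dif_pos h]
      have hcur : (cs.drop start).take (i - start) ++ [cs[i]]
          = (cs.drop start).take (i + 1 - start) := by
        have h1 : (cs.drop start)[i - start]? = some cs[i] := by
          rw [List.getElem?_drop, List.getElem?_eq_getElem (by omega)]
          simp [show start + (i - start) = i from by omega]
        rw [show i + 1 - start = (i - start) + 1 from by omega, List.take_add_one, h1]
        rfl
      rw [hcur]
      by_cases hpc : ((cs[i] == '.' || cs[i] == '!' || cs[i] == '?')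
          && !(if cs[i] == '"' then !inq else inq)) = true
      · simp only [hpc, if_true]
        rcases Nat.lt_or_ge (pvNextNS cs (i + 1)) cs.length with hj | hj
        · -- a non-space char exists ahead
          have hstrip : (PySem.Chars.strip (cs.drop (i + 1))).isEmpty = false := by
            rw [List.isEmpty_eq_false_iff]  -- maybe wrong name
            intro hnil
            rw [pv_strip_eq_nil_iff] at hnil
            have hfind := pv_find?_drop cs (i + 1)
            rw [List.getElem?_eq_getElem hj] at hfind
            have hps := List.find?_some hfind
            have hmem := List.mem_of_find?_eq_some hfind
            have := hnil _ hmem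
            simp [this] at hps
          simp only [hstrip, Bool.false_eq_true, if_false]
          rw [pv_find?_drop, List.getElem?_eq_getElem hj]
          simp only [dif_pos hj]
          by_cases hC : (cs[pvNextNS cs (i + 1)] == '"' || cs[pvNextNS cs (i + 1)] == '('
              || cs[pvNextNS cs (i + 1)] == '[' || PySem.Chars.isupper cs[pvNextNS cs (i + 1)]) = true
          · simp only [hC, if_true]
            rw [pv_skipA_succ, PySem.List.slice_natCast]
            have hfuel : cs.length - pvNextNS cs (i + 1) ≤ k := by
              have := pvNextNS_le cs (i + 1); omega
            have := ih (pvNextNS cs (i + 1)) (pvNextNS cs (i + 1))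
              (parts ++ [String.ofList (PySem.Chars.strip ((cs.drop start).take (i + 1 - start)))])
              (if cs[i] == '"' then !inq else inq) hfuel le_rfl
            simp only [Nat.sub_self, List.take_zero] at this
            rw [this, List.filter_append]
            by_cases hz : String.ofList (PySem.Chars.strip ((cs.drop start).take (i + 1 - start))) = ""
            · simp [hz]
            · simp [hz]
          · simp only [hC, Bool.false_eq_true, if_false]
            exact ih (i + 1) start parts (if cs[i] == '"' then !inq else inq) (by omega) (by omega)
        · -- everything ahead is whitespace
          have hstrip : (PySem.Chars.strip (cs.drop (i + 1))).isEmpty = true := by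
            rw [List.isEmpty_iff, pv_strip_eq_nil_iff]
            intro c hc
            have := pv_find?_drop cs (i + 1)
            rw [List.getElem?_eq_none (by omega)] at this
            have hall := List.find?_eq_none.mp this c hc
            simpa using hall
          simp only [hstrip, if_true, dif_neg (by omega : ¬ pvNextNS cs (i + 1) < cs.length)]
          rw [PySem.List.slice_natCast]
          have := ih (i + 1) (i + 1) (parts ++ [String.ofList (PySem.Chars.strip ((cs.drop start).take (i + 1 - start)))])
            (if cs[i] == '"' then !inq else inq) (by omega) le_rfl
          simp only [Nat.sub_self, List.take_zero] at this
          rw [this, List.filter_append]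
          by_cases hz : String.ofList (PySem.Chars.strip ((cs.drop start).take (i + 1 - start))) = ""
          · simp [hz]
          · simp [hz]
      · simp only [hpc, Bool.false_eq_true, if_false]
        exact ih (i + 1) start parts (if cs[i] == '"' then !inq else inq) (by omega) (by omega)
    · exact ih i start parts inq (by omega) hsi

-- ===== VERDICT (by name: the statement is the Claim_ definition above) =====
theorem split_dialogue_aware_sentences_py_spec : Claim_equal_split_dialogue_aware_sentences_py := by
  intro text _
  unfold Spec_split_dialogue_aware_sentences_py split_dialogue_aware_sentences_py
    split_dialogue_aware_sentences_py_alt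
  by_cases he : text.toList.isEmpty
  · have hl : text.toList = [] := by simpa [List.isEmpty_iff] using he
    simp only [he, if_true]
    rw [pvBLoop]
    simp [hl]
  · simp only [he]
    have := pv_loop_eq text.toList text.toList.length 0 0 [] false (by omega) (by omega)
    simpa using this
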